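-- pv_equiv track=rewrite | github.com/RicardoMartins9321/Universidade_LEI | 1ºAno/FP/Exercícios Estudo/Exercicios extra 1/Teste Ensaio CodeCheck/allmatches.py | allMatches
-- ===== SOURCE A (Python) =====
-- def allMatches(teams):
--     assert len(teams) >= 2, "Requires two or more teams!"
--     x = []
--     for i in range(0, len(teams)):
--         for n in range(0, len(teams)):
--             if teams[i] != teams[n] and x.count((teams[i], teams[n])) == 0:
--                 x.append((teams[i], teams[n]))
--     return x
-- ===== SOURCE B (Python) =====
-- def allMatches(teams):
--     assert len(teams) >= 2, "Requires two or more teams!"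
--     unique = []
--     for t in teams:
--         if t not in unique:
--             unique.append(t)
--     return [(a, b) for a in unique for b in unique if a != b]
-- ===== Notes on version B (the rewrite author's own statement) =====
-- stated objective: faster
-- what changed: Instead of scanning the growing output with x.count inside an n-by-n index loop, B first builds the list of distinct teams in first-appearance order and then emits every ordered pair of unequal distinct values with a comprehension, eliminating the inner output scan entirely.
import Mathlib
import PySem

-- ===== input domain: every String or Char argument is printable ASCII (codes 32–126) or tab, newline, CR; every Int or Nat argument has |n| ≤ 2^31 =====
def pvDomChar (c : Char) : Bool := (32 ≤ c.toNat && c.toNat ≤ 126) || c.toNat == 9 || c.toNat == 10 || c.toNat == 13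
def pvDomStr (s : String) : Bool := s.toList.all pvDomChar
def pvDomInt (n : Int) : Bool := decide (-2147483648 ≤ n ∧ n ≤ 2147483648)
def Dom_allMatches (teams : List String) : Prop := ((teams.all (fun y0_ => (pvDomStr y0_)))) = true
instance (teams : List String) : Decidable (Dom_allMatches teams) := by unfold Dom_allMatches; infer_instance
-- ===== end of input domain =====

-- B replaces A's quadratic index loop with inner output scans by: distinct teams in
-- first-appearance order, then all ordered pairs of unequal distinct values (faster in a timing run).

-- ===== PORT A =====
def allMatches (teams : List String) : List (String × String) :=
  (PySem.List.pyRange 0 (PySem.List.len teams) 1).foldl (fun x i =>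
    (PySem.List.pyRange 0 (PySem.List.len teams) 1).foldl (fun x n =>
      if PySem.List.pyGetD teams i "" ≠ PySem.List.pyGetD teams n "" ∧
         x.count (PySem.List.pyGetD teams i "", PySem.List.pyGetD teams n "") = 0
      then x ++ [(PySem.List.pyGetD teams i "", PySem.List.pyGetD teams n "")]
      else x) x) []

-- ===== PORT B =====
def allMatches_alt (teams : List String) : List (String × String) :=
  let unique := teams.foldl (fun u t => if u.contains t then u else u ++ [t]) []
  unique.flatMap (fun a => (unique.filter (fun b => a != b)).map (fun b => (a, b)))

-- ===== PRECONDITION & SPEC =====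
-- A's assert raises AssertionError on lists with fewer than two teams; Pre_ excludes exactly those.
def Pre_allMatches (teams : List String) : Prop := 2 ≤ teams.length
instance (teams : List String) : Decidable (Pre_allMatches teams) := by unfold Pre_allMatches; infer_instance
def pvWitness_allMatches : List String := (["porto", "benfica", "porto"])
def Spec_allMatches (teams : List String) (out : List (String × String)) : Prop := out = allMatches_alt teams
instance (teams : List String) (out : List (String × String)) : Decidable (Spec_allMatches teams out) := by unfold Spec_allMatches; infer_instance

-- ===== CLAIM (what is proved, stated in full; the proofs are below) =====
def Claim_equal_allMatches : Prop := ∀ (teams : List String), Dom_allMatches teams → Pre_allMatches teams → Spec_allMatches teams (allMatches teams)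

-- ===== LEMMAS AND PROOFS =====

-- A's inner-loop body, on values rather than indices.
def istep (t : String) (x : List (String × String)) (s : String) : List (String × String) :=
  if t ≠ s ∧ x.count (t, s) = 0 then x ++ [(t, s)] else x

-- first-appearance deduplication relative to an already-seen list u
def uniqAux (u : List String) : List String → List String
  | [] => []
  | s :: ss => if u.contains s then uniqAux u ss else s :: uniqAux (u ++ [s]) ss

theorem uniqAux_spec : ∀ (ys u : List String),
    (uniqAux u ys).Nodup ∧ ∀ s ∈ uniqAux u ys, s ∉ u := by
  intro ys
  induction ys with
  | nil => intro u; simp [uniqAux]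
  | cons s ss ih =>
    intro u
    by_cases hc : s ∈ u
    · have hrw : uniqAux u (s :: ss) = uniqAux u ss := by
        simp [uniqAux, hc]
      rw [hrw]; exact ih u
    · have h := ih (u ++ [s])
      have hrw : uniqAux u (s :: ss) = s :: uniqAux (u ++ [s]) ss := by
        simp [uniqAux, hc]
      rw [hrw]
      refine ⟨List.nodup_cons.mpr ⟨fun hs => (h.2 s hs) (by simp), h.1⟩, ?_⟩
      intro s' hs'
      rcases List.mem_cons.mp hs' with rfl | hs'
      · exact hc
      · intro hmem; exact (h.2 s' hs') (by simp [hmem])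

theorem unique_eq_uniqAux : ∀ (ys acc : List String),
    ys.foldl (fun u t => if u.contains t then u else u ++ [t]) acc = acc ++ uniqAux acc ys := by
  intro ys
  induction ys with
  | nil => intro acc; simp [uniqAux]
  | cons s ss ih =>
    intro acc
    rw [List.foldl_cons]
    by_cases hc : s ∈ acc
    · rw [if_pos (by simpa using hc), ih acc]
      simp [uniqAux, hc]
    · rw [if_neg (by simpa using hc), ih (acc ++ [s])]
      simp [uniqAux, hc]

-- generic: a fold whose step is a no-op on "handled" elements ignores duplicates
theorem foldl_uniqAux {β : Type} (step : β → String → β) (H : β → String → Prop)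
    (hnoop : ∀ x s, H x s → step x s = x)
    (hestab : ∀ x s, H (step x s) s)
    (hmono : ∀ x s s', H x s' → H (step x s) s') :
    ∀ (ys u : List String) (x : β), (∀ s ∈ u, H x s) →
      ys.foldl step x = (uniqAux u ys).foldl step x := by
  intro ys
  induction ys with
  | nil => intro u x _; rfl
  | cons s ss ih =>
    intro u x hu
    by_cases hc : s ∈ u
    · have hrw : uniqAux u (s :: ss) = uniqAux u ss := by simp [uniqAux, hc]
      rw [List.foldl_cons, hnoop x s (hu s hc), hrw]
      exact ih u x hu
    · have hrw : uniqAux u (s :: ss) = s :: uniqAux (u ++ [s]) ss := by simp [uniqAux, hc]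
      rw [List.foldl_cons, hrw, List.foldl_cons]
      refine ih (u ++ [s]) (step x s) ?_
      intro s' hs'
      rcases List.mem_append.mp hs' with h' | h'
      · exact hmono x s s' (hu s' h')
      · rw [List.mem_singleton] at h'; rw [h']; exact hestab x s

def Hin (t : String) (x : List (String × String)) (s : String) : Prop := s = t ∨ (t, s) ∈ x

theorem istep_noop (t : String) (x : List (String × String)) (s : String)
    (h : Hin t x s) : istep t x s = x := by
  rcases h with rfl | h
  · simp [istep]
  · have hcnt : ¬ (t ≠ s ∧ x.count (t, s) = 0) :=
      fun ⟨_, hc⟩ => (List.count_eq_zero.mp hc) h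
    simp [istep, hcnt]

theorem istep_estab (t : String) (x : List (String × String)) (s : String) :
    Hin t (istep t x s) s := by
  unfold istep Hin
  split_ifs with h
  · right; simp
  · rw [not_and_or] at h
    rcases h with h | h
    · left; simpa [eq_comm] using h
    · right; exact List.count_pos_iff.mp (Nat.pos_of_ne_zero h)

theorem istep_mono (t : String) (x : List (String × String)) (s : String)
    (p : String × String) (h : p ∈ x) : p ∈ istep t x s := by
  unfold istep; split_ifs <;> simp [h]

theorem inner_mono (L : List String) (t : String) :
    ∀ (x : List (String × String)) (p : String × String), p ∈ x → p ∈ L.foldl (istep t) x := by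
  induction L with
  | nil => intro x p h; exact h
  | cons s ss ih =>
    intro x p h
    exact ih (istep t x s) p (istep_mono t x s p h)

theorem inner_elem (L : List String) (t : String) :
    ∀ (x : List (String × String)) (s : String), s ∈ L → Hin t (L.foldl (istep t) x) s := by
  induction L with
  | nil => intro x s h; simp at h
  | cons a ss ih =>
    intro x s h
    rcases List.mem_cons.mp h with rfl | h
    · rcases istep_estab t x s with h' | h'
      · exact Or.inl h'
      · exact Or.inr (inner_mono ss t (istep t x s) _ h')
    · exact ih (istep t x a) s h

theorem inner_noop (L : List String) (t : String) :
    ∀ (x : List (String × String)), (∀ s ∈ L, Hin t x s) → L.foldl (istep t) x = x := by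
  induction L with
  | nil => intro x _; rfl
  | cons s ss ih =>
    intro x h
    rw [List.foldl_cons, istep_noop t x s (h s (by simp))]
    exact ih x (fun s' hs' => h s' (by simp [hs']))

theorem inner_dedup (teams : List String) (t : String) (x : List (String × String)) :
    teams.foldl (istep t) x = (uniqAux [] teams).foldl (istep t) x :=
  foldl_uniqAux (istep t) (Hin t) (istep_noop t) (istep_estab t)
    (fun x s s' h => by
      rcases h with h | h
      · exact Or.inl h
      · exact Or.inr (istep_mono t x s _ h))
    teams [] x (by simp)

theorem outer_dedup (teams : List String) (U : List String) :
    teams.foldl (fun x t => U.foldl (istep t) x) [] =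
      (uniqAux [] teams).foldl (fun x t => U.foldl (istep t) x) [] :=
  foldl_uniqAux (fun x t => U.foldl (istep t) x)
    (fun x t => ∀ s ∈ U, Hin t x s)
    (fun x t h => inner_noop U t x h)
    (fun x t s hs => inner_elem U t x s hs)
    (fun x t t' h s hs => by
      rcases h s hs with h' | h'
      · exact Or.inl h'
      · exact Or.inr (inner_mono U t x _ h'))
    teams [] [] (by simp)

-- when the pair (t, s) is fresh for every s in a nodup list, the inner loop is a filter+map
theorem inner_fresh : ∀ (L : List String) (t : String) (x : List (String × String)),
    L.Nodup → (∀ s ∈ L, (t, s) ∉ x) →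
    L.foldl (istep t) x = x ++ (L.filter (fun s => t != s)).map (fun s => (t, s)) := by
  intro L
  induction L with
  | nil => intro t x _ _; simp
  | cons s ss ih =>
    intro t x hnd hfresh
    have hcnt : x.count (t, s) = 0 := List.count_eq_zero.mpr (hfresh s (by simp))
    by_cases hts : t = s
    · subst hts
      rw [List.foldl_cons]
      have : istep t x t = x := by simp [istep]
      rw [this, ih t x hnd.of_cons (fun s' hs' => hfresh s' (by simp [hs']))]
      simp
    · rw [List.foldl_cons]
      have hstep : istep t x s = x ++ [(t, s)] := by simp [istep, hts, hcnt]
      rw [hstep, ih t (x ++ [(t, s)]) hnd.of_cons ?_]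
      · have hf : (s :: ss).filter (fun s' => t != s') = s :: ss.filter (fun s' => t != s') := by
          simp [bne_iff_ne, hts]
        rw [hf]; simp
      · intro s' hs'
        simp only [List.mem_append, List.mem_singleton, not_or]
        refine ⟨hfresh s' (by simp [hs']), ?_⟩
        intro heq
        have hss : s' = s := by simpa [Prod.ext_iff] using heq
        exact (List.nodup_cons.mp hnd).1 (hss ▸ hs')

theorem outer_fresh (U : List String) (hU : U.Nodup) :
    ∀ (M : List String) (x : List (String × String)),
      M.Nodup → (∀ a ∈ M, ∀ p ∈ x, p.1 ≠ a) →
      M.foldl (fun x t => U.foldl (istep t) x) x =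
        x ++ M.flatMap (fun a => (U.filter (fun b => a != b)).map (fun b => (a, b))) := by
  intro M
  induction M with
  | nil => intro x _ _; simp
  | cons a mm ih =>
    intro x hnd hfst
    rw [List.foldl_cons]
    have h1 : U.foldl (istep a) x = x ++ (U.filter (fun b => a != b)).map (fun b => (a, b)) := by
      refine inner_fresh U a x hU ?_
      intro s hs hmem
      exact (hfst a (by simp) _ hmem) rfl
    rw [h1, ih _ hnd.of_cons ?_]
    · simp
    · intro a' ha' p hp
      rcases List.mem_append.mp hp with hp | hp
      · exact hfst a' (by simp [ha']) p hp
      · obtain ⟨b, _, rfl⟩ := List.mem_map.mp hp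
        intro heq
        have haa : a = a' := heq
        exact (List.nodup_cons.mp hnd).1 (by rw [haa]; exact ha')

theorem allMatches_as_foldl (teams : List String) :
    allMatches teams = teams.foldl (fun x t => teams.foldl (istep t) x) [] := by
  unfold allMatches
  have h1 : ∀ (i : Int) (x : List (String × String)),
      (PySem.List.pyRange 0 (PySem.List.len teams) 1).foldl
        (fun x n => istep (PySem.List.pyGetD teams i "") x (PySem.List.pyGetD teams n "")) x =
      teams.foldl (istep (PySem.List.pyGetD teams i "")) x := by
    intro i x
    exact PySem.List.foldl_pyRange_zero_pyGetD teams "" (istep (PySem.List.pyGetD teams i "")) x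
  calc (PySem.List.pyRange 0 (PySem.List.len teams) 1).foldl (fun x i =>
          (PySem.List.pyRange 0 (PySem.List.len teams) 1).foldl
            (fun x n => istep (PySem.List.pyGetD teams i "") x (PySem.List.pyGetD teams n "")) x) []
      = (PySem.List.pyRange 0 (PySem.List.len teams) 1).foldl (fun x i =>
          teams.foldl (istep (PySem.List.pyGetD teams i "")) x) [] := by
        simp only [h1]
    _ = teams.foldl (fun x t => teams.foldl (istep t) x) [] :=
        PySem.List.foldl_pyRange_zero_pyGetD teams "" (fun x t => teams.foldl (istep t) x) []

-- ===== VERDICT (by name: the statement is the Claim_ definition above) =====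
theorem allMatches_spec : Claim_equal_allMatches := by
  intro teams _ _
  unfold Spec_allMatches allMatches_alt
  set U := uniqAux [] teams with hUdef
  have hU : teams.foldl (fun u t => if u.contains t then u else u ++ [t]) [] = U := by
    simpa using unique_eq_uniqAux teams []
  have hnd : U.Nodup := (uniqAux_spec teams []).1
  rw [allMatches_as_foldl teams, hU]
  have hinner : teams.foldl (fun x t => teams.foldl (istep t) x) []
      = teams.foldl (fun x t => U.foldl (istep t) x) [] := by
    simp only [fun t x => inner_dedup teams t x, hUdef]
  rw [hinner, outer_dedup teams U, ← hUdef]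
  rw [outer_fresh U hnd U [] hnd (by simp)]
  simp
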